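-- pv_equiv track=rewrite | github.com/Rheyhan/foo.bar-rhey | 1/solution.py | solution
-- ===== SOURCE A (Python) =====
-- def solution(s):
--     length = len(s)
--
--     for i in range(1, length):
--         substring = s[:i]
--         times = length // i
--         if substring * times == s:
--             return times
--
--     return 1
-- ===== SOURCE B (Python) =====
-- def solution(s):
--     n = len(s)
--     # enumerate the divisors of n in increasing order: those up to sqrt(n),
--     # then their cofactors in reverse
--     small, large = [], []
--     i = 1
--     while i * i <= n:
--         if n % i == 0:
--             small.append(i)
--             if i * i != n:
--                 large.append(n // i)
--         i += 1
--     for d in small + large[::-1]: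
--         if d < n and s[d:] == s[:-d]:
--             return n // d
--     return 1
-- ===== Notes on version B (the rewrite author's own statement) =====
-- stated objective: faster
-- what changed: Instead of testing every prefix length 1..n-1 by building substring*times and comparing (O(n^2)), B enumerates only the divisors of n via a sqrt(n) pair scan and tests each candidate period with a single overlap comparison s[d:] == s[:-d], O(n*d(n)).
import Mathlib
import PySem

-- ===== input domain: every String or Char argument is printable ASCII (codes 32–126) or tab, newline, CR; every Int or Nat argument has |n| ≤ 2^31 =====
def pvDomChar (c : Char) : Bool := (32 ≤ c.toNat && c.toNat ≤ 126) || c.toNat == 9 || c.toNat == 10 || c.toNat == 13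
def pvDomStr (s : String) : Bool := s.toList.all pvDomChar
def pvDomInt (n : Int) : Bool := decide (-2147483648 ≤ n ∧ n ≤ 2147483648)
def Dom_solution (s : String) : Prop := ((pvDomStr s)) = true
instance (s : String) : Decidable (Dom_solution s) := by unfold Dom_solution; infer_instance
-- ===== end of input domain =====

-- B enumerates only the divisors of n (paired sqrt scan) and tests each candidate period
-- with one overlap comparison s[d:] == s[:-d], instead of A's scan of every prefix length
-- with a built-up repetition; the return values are proved equal below.

-- ===== PORT A =====
def solutionLoopA (cs : List Char) (length : Int) : List Int → Int
  | [] => 1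
  | i :: rest =>
    let substring := PySem.List.slice cs none (some i)
    let times := PySem.Int.floordiv length i
    if PySem.List.pyRepeat substring times = cs then times
    else solutionLoopA cs length rest

def solution (s : String) : Int :=
  let length : Int := PySem.Str.len s
  solutionLoopA s.toList length (PySem.List.pyRange 1 length 1)

-- ===== PORT B =====
-- the sqrt-paired divisor scan of Source B: small collects divisors i with i*i ≤ n,
-- large their cofactors n / i
def divLoop (n : Nat) (i : Nat) (small large : List Nat) : List Nat × List Nat :=
  if h : 0 < i ∧ i * i ≤ n then
    if n % i = 0 then
      divLoop n (i + 1) (small ++ [i]) (if i * i ≠ n then large ++ [n / i] else large)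
    else
      divLoop n (i + 1) small large
  else (small, large)
termination_by n + 1 - i
decreasing_by
  all_goals
    (have hin : i ≤ n := le_trans (Nat.le_mul_of_pos_left i h.1) h.2; omega)

def solutionLoopB (cs : List Char) (n : Nat) : List Nat → Int
  | [] => 1
  | d :: rest =>
    if d < n ∧ PySem.List.slice cs (some (d : Int)) none
               = PySem.List.slice cs none (some (-(d : Int))) then
      ((n / d : Nat) : Int)
    else solutionLoopB cs n rest

def solution_alt (s : String) : Int :=
  let cs := s.toList
  let n := cs.length
  let p := divLoop n 1 [] []
  solutionLoopB cs n (p.1 ++ p.2.reverse)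

-- ===== PRECONDITION & SPEC =====
def Spec_solution (s : String) (out : Int) : Prop := out = solution_alt s
instance (s : String) (out : Int) : Decidable (Spec_solution s out) := by unfold Spec_solution; infer_instance

-- ===== CLAIM (what is proved, stated in full; the proofs are below) =====
def Claim_equal_solution : Prop := ∀ (s : String), Dom_solution s → Spec_solution s (solution s)

-- ===== LEMMAS AND PROOFS =====

-- cs has period d (characters d apart agree), phrased as the overlap equation s[d:] = s[:-d]
def pvPer (cs : List Char) (d : Nat) : Prop :=
  List.drop d cs = List.take (cs.length - d) cs

def pvDivList (n : Nat) : List Nat :=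
  (divLoop n 1 [] []).1 ++ (divLoop n 1 [] []).2.reverse

lemma pvPeriod_repeat (k : Nat) (hk : 0 < k) :
    ∀ (t : Nat) (cs : List Char), cs.length = k * t → pvPer cs k →
      (List.replicate t (cs.take k)).flatten = cs := by
  intro t
  induction t with
  | zero =>
    intro cs hlen _
    have : cs = [] := List.length_eq_zero_iff.mp (by simpa using hlen)
    simp [this]
  | succ t ih =>
    intro cs hlen hper
    by_cases ht : t = 0
    · subst ht
      have : cs.take k = cs := List.take_of_length_le (by omega)
      simp [this]
    · have h2k : k + k ≤ cs.length := by
        have : 2 ≤ t + 1 := by omega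
        calc k + k = k * 2 := by ring
        _ ≤ k * (t+1) := Nat.mul_le_mul_left k this
        _ = cs.length := hlen.symm
      set v := cs.drop k with hv
      have hvlen : v.length = k * t := by
        rw [hv, List.length_drop, hlen, Nat.mul_succ]; omega
      have hvtake : v.take k = cs.take k := by
        rw [hv, hper]
        rw [List.take_take, Nat.min_eq_left (by omega)]
      have hvper : pvPer v k := by
        unfold pvPer
        rw [hv, hper, List.drop_take, hper, List.take_take]
        simp only [List.length_take, List.take_take]
        congr 1
        omega
      have hrec : (List.replicate t (List.take k cs)).flatten = v := by
        rw [← hvtake]; exact ih v hvlen hvper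
      rw [List.replicate_succ, List.flatten_cons, hrec, hv]
      exact List.take_append_drop k cs

lemma pvRepeat_period_fwd (cs : List Char) (k t : Nat) (h1 : 0 < k) (h2 : k < cs.length)
    (h : (List.replicate t (cs.take k)).flatten = cs) :
    k ∣ cs.length ∧ pvPer cs k := by
  have hulen : (cs.take k).length = k := by
    rw [List.length_take]; omega
  have hflen : ((List.replicate t (cs.take k)).flatten).length = t * k := by
    simp [List.length_flatten, List.map_replicate, hulen, List.sum_replicate]
  have hlen : t * k = cs.length := by rw [← hflen, h]
  have hdvd : k ∣ cs.length := ⟨t, by rw [← hlen, Nat.mul_comm]⟩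
  refine ⟨hdvd, ?_⟩
  have ht1 : 1 ≤ t := by
    by_contra hc
    have : t = 0 := by omega
    subst this
    simp at hlen
    omega
  have hsplit1 : cs = cs.take k ++ (List.replicate (t-1) (cs.take k)).flatten := by
    conv_lhs => rw [← h, show t = (t-1) + 1 by omega]
    rw [List.replicate_succ, List.flatten_cons]
  have hsplit2 : cs = (List.replicate (t-1) (cs.take k)).flatten ++ cs.take k := by
    conv_lhs => rw [← h, show t = (t-1) + 1 by omega]
    rw [List.replicate_succ', List.flatten_append]
    simp
  have hrlen : ((List.replicate (t-1) (cs.take k)).flatten).length = cs.length - k := by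
    simp [List.length_flatten, List.map_replicate, hulen, List.sum_replicate]
    rw [Nat.sub_mul, one_mul, hlen]
  unfold pvPer
  calc List.drop k cs = (List.replicate (t-1) (cs.take k)).flatten := by
        conv_lhs => rw [hsplit1]
        exact List.drop_left' hulen
    _ = List.take (cs.length - k) cs := by
        have h2 : (List.replicate (t-1) (cs.take k)).flatten
            = List.take (cs.length - k)
                ((List.replicate (t-1) (cs.take k)).flatten ++ cs.take k) :=
          (List.take_left' hrlen).symm
        rw [← hsplit2] at h2
        exact h2

lemma pvRepeat_period (cs : List Char) (k : Nat) (h1 : 0 < k) (h2 : k < cs.length) :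
    (List.replicate (cs.length / k) (cs.take k)).flatten = cs ↔
      k ∣ cs.length ∧ pvPer cs k := by
  constructor
  · exact pvRepeat_period_fwd cs k (cs.length / k) h1 h2
  · rintro ⟨⟨t, ht⟩, hper⟩
    have : cs.length / k = t := by rw [ht]; exact Nat.mul_div_cancel_left t h1
    rw [this]
    exact pvPeriod_repeat k h1 t cs (by omega) hper

lemma pvFind_sorted_congr (l1 l2 : List Nat) (p q : Nat → Bool)
    (h1 : l1.Pairwise (· < ·)) (h2 : l2.Pairwise (· < ·))
    (hpq : ∀ x, (x ∈ l1 ∧ p x = true) ↔ (x ∈ l2 ∧ q x = true)) :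
    l1.find? p = l2.find? q := by
  have hfeq : l1.filter p = l2.filter q := by
    have hn1 : (l1.filter p).Pairwise (· < ·) := List.Pairwise.filter p h1
    have hn2 : (l2.filter q).Pairwise (· < ·) := List.Pairwise.filter q h2
    have hperm : (l1.filter p).Perm (l2.filter q) := by
      apply (List.perm_ext_iff_of_nodup hn1.nodup hn2.nodup).mpr
      intro x
      simp only [List.mem_filter]
      exact hpq x
    exact List.Perm.eq_of_pairwise
      (fun a b _ _ h h' => le_antisymm h h')
      (hn1.imp le_of_lt) (hn2.imp le_of_lt) hperm
  rw [← List.head?_filter, ← List.head?_filter, hfeq]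

lemma pvDivLoop_spec (n : Nat) : ∀ (i : Nat) (small large : List Nat), 0 < i →
    divLoop n i small large =
      (small ++ (List.range' i (Nat.sqrt n + 1 - i)).filter (fun d => decide (d ∣ n)),
       large ++ ((List.range' i (Nat.sqrt n + 1 - i)).filter
                  (fun d => decide (d ∣ n ∧ d * d ≠ n))).map (n / ·)) := by
  have key : ∀ (k i : Nat) (small large : List Nat), 0 < i → n + 1 - i ≤ k →
      divLoop n i small large =
        (small ++ (List.range' i (Nat.sqrt n + 1 - i)).filter (fun d => decide (d ∣ n)),
         large ++ ((List.range' i (Nat.sqrt n + 1 - i)).filter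
                    (fun d => decide (d ∣ n ∧ d * d ≠ n))).map (n / ·)) := by
    intro k
    induction k with
    | zero =>
      intro i small large hi hk
      have hni : n < i := by omega
      have hs : Nat.sqrt n + 1 - i = 0 := by
        have := Nat.sqrt_le_self n
        omega
      rw [divLoop]
      have hcond : ¬ (0 < i ∧ i * i ≤ n) := by
        rintro ⟨h1, h2⟩
        have : i ≤ i * i := Nat.le_mul_of_pos_left i h1
        omega
      rw [dif_neg hcond, hs]
      simp
    | succ k ih =>
      intro i small large hi hk
      rw [divLoop]
      by_cases hcond : 0 < i ∧ i * i ≤ n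
      · have hisq : i ≤ Nat.sqrt n := Nat.le_sqrt.mpr hcond.2
        have hin : i ≤ n := le_trans (Nat.le_mul_of_pos_left i hcond.1) hcond.2
        rw [dif_pos hcond]
        rw [show Nat.sqrt n + 1 - i = (Nat.sqrt n + 1 - (i+1)) + 1 by omega, List.range'_succ]
        by_cases hmod : n % i = 0
        · have hdvd : i ∣ n := Nat.dvd_of_mod_eq_zero hmod
          rw [if_pos hmod, ih (i+1) _ _ (by omega) (by omega)]
          by_cases hsq : i * i ≠ n
          · rw [if_pos hsq]
            simp [hdvd, hsq]
          · rw [if_neg hsq]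
            simp [hdvd, hsq]
        · have hdvd : ¬ i ∣ n := fun h => hmod (Nat.mod_eq_zero_of_dvd h)
          rw [if_neg hmod, ih (i+1) _ _ (by omega) (by omega)]
          simp [hdvd]
      · have hgt : Nat.sqrt n < i := by
          rcases Nat.lt_or_ge (Nat.sqrt n) i with h | h
          · exact h
          · exfalso; exact hcond ⟨by omega, Nat.le_sqrt.mp h⟩
        rw [dif_neg hcond, show Nat.sqrt n + 1 - i = 0 by omega]
        simp
  intro i small large hi
  exact key (n + 1 - i) i small large hi le_rfl

lemma pvCofactor_lt (n b c : Nat) (hn : 0 < n) (hb : b ∣ n) (hc : c ∣ n) (h : c < b) :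
    n / b < n / c := by
  have hc0 : 0 < c := Nat.pos_of_dvd_of_pos hc hn
  have hb0 : 0 < b := by omega
  have hbe : n / b * b = n := Nat.div_mul_cancel hb
  have hce : n / c * c = n := Nat.div_mul_cancel hc
  by_contra hcon
  have h1 : n / c ≤ n / b := by omega
  have h2 : n / c * c < n / b * b := by
    calc n / c * c < n / c * b := by
          have hpos : 0 < n / c := Nat.div_pos (Nat.le_of_dvd hn hc) hc0
          exact Nat.mul_lt_mul_of_pos_left h hpos
      _ ≤ n / b * b := Nat.mul_le_mul_right b h1
  omega

lemma pvDivList_eq (n : Nat) :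
    pvDivList n = (List.range' 1 (Nat.sqrt n)).filter (fun d => decide (d ∣ n))
      ++ (((List.range' 1 (Nat.sqrt n)).filter
            (fun d => decide (d ∣ n ∧ d * d ≠ n))).map (n / ·)).reverse := by
  unfold pvDivList
  rw [pvDivLoop_spec n 1 [] [] (by omega)]
  simp

lemma pvDivList_mem (n : Nat) (hn : 0 < n) (x : Nat) :
    x ∈ pvDivList n ↔ (0 < x ∧ x ∣ n) := by
  rw [pvDivList_eq]
  simp only [List.mem_append, List.mem_reverse, List.mem_map, List.mem_filter,
    List.mem_range'_1, decide_eq_true_eq]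
  constructor
  · rintro (⟨⟨hx1, hx2⟩, hdvd⟩ | ⟨d, ⟨⟨hd1, hd2⟩, hdvd, hne⟩, rfl⟩)
    · exact ⟨by omega, hdvd⟩
    · exact ⟨Nat.div_pos (Nat.le_of_dvd hn hdvd) (by omega), Nat.div_dvd_of_dvd hdvd⟩
  · rintro ⟨hx0, hxd⟩
    by_cases hsq : x ≤ Nat.sqrt n
    · exact Or.inl ⟨⟨hx0, by omega⟩, hxd⟩
    · right
      push_neg at hsq
      refine ⟨n / x, ⟨⟨?_, ?_⟩, ?_, ?_⟩, ?_⟩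
      · exact Nat.div_pos (Nat.le_of_dvd hn hxd) hx0
      · -- n / x ≤ sqrt n, i.e. (n/x)*(n/x) ≤ n
        have h1 : n / x < x := by
          have hxx : n < x ^ 2 := Nat.sqrt_lt'.mp hsq
          rw [pow_two] at hxx
          exact (Nat.div_lt_iff_lt_mul hx0).mpr hxx
        have h2 : n / x * x = n := Nat.div_mul_cancel hxd
        have : n / x * (n / x) ≤ n := by
          calc n / x * (n / x) ≤ n / x * x := Nat.mul_le_mul_left _ (le_of_lt h1)
            _ = n := h2
        have := Nat.le_sqrt.mpr this
        omega
      · exact Nat.div_dvd_of_dvd hxd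
      · -- (n/x)*(n/x) ≠ n
        intro hcon
        have h2x : n / x * x = n := Nat.div_mul_cancel hxd
        have hd0 : 0 < n / x := Nat.div_pos (Nat.le_of_dvd hn hxd) hx0
        have hxe : n / x = x := Nat.eq_of_mul_eq_mul_left hd0 (hcon.trans h2x.symm)
        have hs : Nat.sqrt n = n / x := by
          conv_lhs => rw [← hcon]
          exact Nat.sqrt_eq _
        omega
      · exact Nat.div_div_self hxd (by omega)

lemma pvDivList_sorted (n : Nat) (hn : 0 < n) : (pvDivList n).Pairwise (· < ·) := by
  rw [pvDivList_eq]
  rw [List.pairwise_append]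
  refine ⟨List.Pairwise.filter _ (by simpa using List.pairwise_lt_range' (s := 1) (n := Nat.sqrt n) 1), ?_, ?_⟩
  · rw [List.pairwise_reverse]
    rw [List.pairwise_map]
    apply List.Pairwise.imp_of_mem ?_ (List.Pairwise.filter _ (by simpa using List.pairwise_lt_range' (s := 1) (n := Nat.sqrt n) 1))
    intro a b ha hb hab
    simp only [List.mem_filter, decide_eq_true_eq] at ha hb
    exact pvCofactor_lt n b a hn hb.2.1 ha.2.1 hab
  · intro a ha b hb
    simp only [List.mem_reverse, List.mem_map, List.mem_filter, List.mem_range'_1,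
      decide_eq_true_eq] at ha hb
    obtain ⟨⟨ha1, ha2⟩, hadvd⟩ := ha
    obtain ⟨d, ⟨⟨hd1, hd2⟩, hdvd, hne⟩, rfl⟩ := hb
    -- a ≤ sqrt n < n / d
    have hdlt : d < n / d := by
      have h2 : d * (n / d) = n := Nat.mul_div_cancel' hdvd
      rcases Nat.lt_or_ge d (n / d) with h | h
      · exact h
      · exfalso
        have hle : n ≤ d * d := by calc n = d * (n/d) := h2.symm
                                      _ ≤ d * d := Nat.mul_le_mul_left d h
        have hds : d * d ≤ n := Nat.le_sqrt.mp (by omega)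
        exact hne (by omega)
    have : Nat.sqrt n < n / d := by
      have h2 : d * (n / d) = n := Nat.mul_div_cancel' hdvd
      have : n < (n / d) * (n / d) := by
        calc n = d * (n/d) := h2.symm
          _ < (n/d) * (n/d) := by
              have hpos : 0 < n / d := by omega
              exact Nat.mul_lt_mul_of_lt_of_le hdlt (le_refl _) hpos
      have := Nat.sqrt_lt'.mpr (by simpa [pow_two] using this)
      omega
    omega

lemma pvLoopA_eq_find (cs : List Char) (n : Int) (l : List Int) :
    solutionLoopA cs n l =
      match l.find? (fun i => decide
          (PySem.List.pyRepeat (PySem.List.slice cs none (some i)) (PySem.Int.floordiv n i) = cs)) with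
      | some i => PySem.Int.floordiv n i
      | none => 1 := by
  induction l with
  | nil => rfl
  | cons i rest ih =>
    by_cases h : PySem.List.pyRepeat (PySem.List.slice cs none (some i)) (PySem.Int.floordiv n i) = cs
    · simp only [solutionLoopA]
      rw [if_pos h]
      simp only [List.find?_cons, decide_eq_true h]
    · simp only [solutionLoopA]
      rw [if_neg h]
      simp only [List.find?_cons, decide_eq_false h]
      exact ih

lemma pvLoopB_eq_find (cs : List Char) (n : Nat) (l : List Nat) :
    solutionLoopB cs n l =
      match l.find? (fun d => decide (d < n ∧ PySem.List.slice cs (some (d : Int)) none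
               = PySem.List.slice cs none (some (-(d : Int))))) with
      | some d => ((n / d : Nat) : Int)
      | none => 1 := by
  induction l with
  | nil => rfl
  | cons d rest ih =>
    by_cases h : d < n ∧ PySem.List.slice cs (some (d : Int)) none
               = PySem.List.slice cs none (some (-(d : Int)))
    · simp only [solutionLoopB]
      rw [if_pos h]
      simp only [List.find?_cons, decide_eq_true h]
    · simp only [solutionLoopB]
      rw [if_neg h]
      simp only [List.find?_cons, decide_eq_false h]
      exact ih

-- A's loop test, on indices in range, is exactly "divisor and period"
lemma pvCheckA_iff (cs : List Char) (x : Nat) (h0 : 0 < x) (h1 : x < cs.length) :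
    (PySem.List.pyRepeat (PySem.List.slice cs none (some (x : Int)))
        (PySem.Int.floordiv (cs.length : Int) (x : Int)) = cs)
      ↔ (x ∣ cs.length ∧ pvPer cs x) := by
  rw [PySem.List.slice_to_natCast, PySem.Int.floordiv_natCast]
  show PySem.List.pyRepeat (cs.take x) ((cs.length / x : Nat) : Int) = cs ↔ _
  unfold PySem.List.pyRepeat
  rw [Int.toNat_natCast]
  exact pvRepeat_period cs x h0 h1

-- B's loop test is exactly "short enough and period"
lemma pvCheckB_iff (cs : List Char) (x : Nat) (h0 : 0 < x) :
    (x < cs.length ∧ PySem.List.slice cs (some (x : Int)) none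
        = PySem.List.slice cs none (some (-(x : Int))))
      ↔ (x < cs.length ∧ pvPer cs x) := by
  rw [PySem.List.slice_from_natCast, PySem.List.slice_to_neg_natCast cs x h0]
  exact Iff.rfl

-- ===== VERDICT (by name: the statement is the Claim_ definition above) =====
theorem solution_spec : Claim_equal_solution := by
  unfold Claim_equal_solution Spec_solution
  intro s _
  set cs := s.toList with hcs
  set N := cs.length with hN
  have hlen : PySem.Str.len s = (N : Int) := by simp [PySem.Str.len_eq, hN, hcs]
  show solutionLoopA cs (PySem.Str.len s) (PySem.List.pyRange 1 (PySem.Str.len s) 1)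
        = solutionLoopB cs N ((divLoop N 1 [] []).1 ++ (divLoop N 1 [] []).2.reverse)
  rw [hlen]
  rcases Nat.eq_zero_or_pos N with hzero | hpos
  · rw [hzero]
    rw [PySem.List.pyRange_one_eq_nil (by norm_num)]
    have : divLoop 0 1 [] [] = ([], []) := by
      rw [pvDivLoop_spec 0 1 [] [] (by omega)]
      simp [Nat.sqrt]
    rw [this]
    rfl
  · -- candidate lists on the Nat side
    have hrange : PySem.List.pyRange 1 (N : Int) 1
        = List.map (fun d : Nat => (d : Int)) (List.range' 1 (N - 1)) := by
      rw [PySem.List.pyRange_one, List.range'_eq_map_range]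
      rw [show ((N : Int) - 1).toNat = N - 1 by omega, List.map_map]
      exact List.map_congr_left (fun k _ => by simp only [Function.comp_apply]; push_cast; ring)
    rw [pvLoopA_eq_find, pvLoopB_eq_find, hrange, List.find?_map,
      show (divLoop N 1 [] []).1 ++ (divLoop N 1 [] []).2.reverse = pvDivList N from rfl]
    have hfind := pvFind_sorted_congr (List.range' 1 (N - 1)) (pvDivList N)
      ((fun i => decide (PySem.List.pyRepeat (PySem.List.slice cs none (some i))
          (PySem.Int.floordiv (N : Int) i) = cs)) ∘ (fun d : Nat => (d : Int)))
      (fun d => decide (d < N ∧ PySem.List.slice cs (some (d : Int)) none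
               = PySem.List.slice cs none (some (-(d : Int)))))
      (by simpa using List.pairwise_lt_range' (s := 1) (n := N - 1) 1)
      (pvDivList_sorted N hpos)
      ?_
    · rw [hfind]
      rcases hval : (pvDivList N).find? (fun d => decide (d < N ∧ PySem.List.slice cs (some (d : Int)) none
               = PySem.List.slice cs none (some (-(d : Int))))) with _ | d
      · rfl
      · show PySem.Int.floordiv (N : Int) (d : Int) = ((N / d : Nat) : Int)
        exact PySem.Int.floordiv_natCast N d
    · intro x
      simp only [Function.comp, decide_eq_true_eq, List.mem_range'_1]
      constructor
      · rintro ⟨⟨hx1, hx2⟩, hcheck⟩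
        have hx2' : x < N := by omega
        have h := (pvCheckA_iff cs x (by omega) (by rwa [← hN])).mp hcheck
        rw [← hN] at h
        refine ⟨(pvDivList_mem N hpos x).mpr ⟨by omega, h.1⟩, ?_⟩
        exact (pvCheckB_iff cs x (by omega)).mpr ⟨by omega, h.2⟩
      · rintro ⟨hmem, hcheck⟩
        obtain ⟨hx0, hxdvd⟩ := (pvDivList_mem N hpos x).mp hmem
        have h := (pvCheckB_iff cs x hx0).mp hcheck
        rw [← hN] at h
        refine ⟨⟨by omega, by omega⟩, ?_⟩
        exact (pvCheckA_iff cs x hx0 (by omega)).mpr ⟨by rwa [hN] at hxdvd, h.2⟩
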